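-- pv_equiv track=rewrite | github.com/kutt27/hardware-architecture | src/toolchain/utils/disassembler.py | disasm_ldm_stm
-- ===== SOURCE A (Python) =====
-- def disasm_ldm_stm(instr: int, cond: str) -> str:
--     """Disassemble load/store multiple"""
--     is_load = (instr >> 20) & 1
--     rn = (instr >> 16) & 0xF
--     reg_list = instr & 0xFFFF
--
--     mnemonic = 'LDM' if is_load else 'STM'
--
--     # Build register list
--     regs = []
--     for i in range(16):
--         if reg_list & (1 << i):
--             regs.append(f"R{i}")
--
--     reg_str = '{' + ', '.join(regs) + '}'
--
--     return f"{mnemonic}{cond} R{rn}, {reg_str}"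
-- ===== SOURCE B (Python) =====
-- def disasm_ldm_stm(instr: int, cond: str) -> str:
--     """Disassemble load/store multiple"""
--     mnemonic = 'LDM' if (instr >> 20) & 1 else 'STM'
--     rn = (instr >> 16) & 0xF
--
--     # Iterate only over the set bits of the mask, lowest first
--     regs = []
--     m = instr & 0xFFFF
--     while m:
--         low = m & -m
--         regs.append(f"R{low.bit_length() - 1}")
--         m ^= low
--
--     return f"{mnemonic}{cond} R{rn}, {{{', '.join(regs)}}}"
-- ===== Notes on version B (the rewrite author's own statement) =====
-- stated objective: alternative
-- what changed: The fixed for-i-in-range(16) scan of all bit positions is replaced by a while loop that visits only the set bits of the mask via lowest-set-bit extraction (low = m & -m, index = low.bit_length() - 1, m ^= low).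
import Mathlib
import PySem

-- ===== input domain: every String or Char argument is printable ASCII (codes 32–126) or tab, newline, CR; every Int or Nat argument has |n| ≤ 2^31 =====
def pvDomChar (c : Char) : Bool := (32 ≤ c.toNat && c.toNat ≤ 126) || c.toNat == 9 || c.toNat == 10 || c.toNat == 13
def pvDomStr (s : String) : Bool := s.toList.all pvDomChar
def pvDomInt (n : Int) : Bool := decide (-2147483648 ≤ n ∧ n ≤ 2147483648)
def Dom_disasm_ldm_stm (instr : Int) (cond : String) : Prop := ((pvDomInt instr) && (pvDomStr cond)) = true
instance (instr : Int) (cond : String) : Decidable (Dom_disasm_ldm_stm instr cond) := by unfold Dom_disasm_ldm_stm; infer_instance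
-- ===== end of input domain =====

-- B replaces A's fixed scan of all 16 bit positions by an iteration over only the
-- set bits of the mask (lowest-set-bit extraction); same output, alternative algorithm.

-- ===== PORT A =====
def disasm_ldm_stm (instr : Int) (cond : String) : String :=
  let is_load := PySem.Int.band (instr >>> 20) 1
  let rn := PySem.Int.band (instr >>> 16) 15
  let reg_list := PySem.Int.band instr 65535
  let mnemonic := if is_load ≠ 0 then "LDM" else "STM"
  let regs := (PySem.List.pyRange 0 16 1).foldl
    (fun acc i => if PySem.Int.band reg_list (1 <<< i.toNat) ≠ 0 then acc ++ ["R" ++ PySem.Int.toStr i] else acc) []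
  let reg_str := "{" ++ PySem.Str.join ", " regs ++ "}"
  mnemonic ++ cond ++ " R" ++ PySem.Int.toStr rn ++ ", " ++ reg_str

-- ===== PORT B =====
-- B's 'while m:' loop; the fuel argument (16, the width of the mask) only makes the
-- recursion structural — the loop condition is still 'm ≠ 0', exactly as in Source B.
def pvBitRegs : Nat → Int → List String
  | 0, _ => []
  | fuel + 1, m =>
    if m ≠ 0 then
      let low := PySem.Int.band m (-m)
      ("R" ++ PySem.Int.toStr ((PySem.Int.bitLength low : Int) - 1)) :: pvBitRegs fuel (PySem.Int.bxor m low)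
    else []

def disasm_ldm_stm_alt (instr : Int) (cond : String) : String :=
  let mnemonic := if PySem.Int.band (instr >>> 20) 1 ≠ 0 then "LDM" else "STM"
  let rn := PySem.Int.band (instr >>> 16) 15
  let regs := pvBitRegs 16 (PySem.Int.band instr 65535)
  mnemonic ++ cond ++ " R" ++ PySem.Int.toStr rn ++ ", " ++ ("{" ++ PySem.Str.join ", " regs ++ "}")

-- ===== PRECONDITION & SPEC =====
def Spec_disasm_ldm_stm (instr : Int) (cond : String) (out : String) : Prop := out = disasm_ldm_stm_alt instr cond
instance (instr : Int) (cond : String) (out : String) : Decidable (Spec_disasm_ldm_stm instr cond out) := by unfold Spec_disasm_ldm_stm; infer_instance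

-- ===== CLAIM (what is proved, stated in full; the proofs are below) =====
def Claim_equal_disasm_ldm_stm : Prop := ∀ (instr : Int) (cond : String), Dom_disasm_ldm_stm instr cond → Spec_disasm_ldm_stm instr cond (disasm_ldm_stm instr cond)

-- ===== LEMMAS AND PROOFS =====

-- pvBitIdx: the list of register indices B's loop emits (proof mirror of pvBitRegs)
def pvBitIdx : Nat → Int → List Int
  | 0, _ => []
  | fuel + 1, m =>
    if m ≠ 0 then
      ((PySem.Int.bitLength (PySem.Int.band m (-m)) : Int) - 1)
        :: pvBitIdx fuel (PySem.Int.bxor m (PySem.Int.band m (-m)))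
    else []

theorem pvBand_lowest (m : Nat) (h : 0 < m) :
    PySem.Int.band (m : Int) (-(m : Int)) = ((m - (m &&& (m - 1)) : Nat) : Int) := by
  unfold PySem.Int.band
  have h1 : (0:Int) ≤ (m:Int) := by omega
  have h2 : ¬ (0:Int) ≤ -(m:Int) := by omega
  have h3 : ((m:Int)).toNat = m := by omega
  have h4 : (-(-(m:Int)) - 1).toNat = m - 1 := by omega
  simp only [if_pos h1, if_neg h2, h3, h4]

theorem pvAnd_two_mul (k : Nat) (h : 0 < k) :
    (2*k) &&& (2*k - 1) = 2 * (k &&& (k - 1)) := by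
  apply Nat.eq_of_testBit_eq
  intro i
  have ha : (2*k) % 2 = 0 := by omega
  have hb : (2 * (k &&& (k-1))) % 2 = 0 := by omega
  cases i with
  | zero =>
    rw [Nat.testBit_and]
    simp only [Nat.testBit_zero, ha, hb]
    simp
  | succ i =>
    have e1 : (2*k) / 2 = k := by omega
    have e2 : (2*k - 1) / 2 = k - 1 := by omega
    have e3 : (2 * (k &&& (k-1))) / 2 = k &&& (k-1) := by omega
    rw [Nat.testBit_and]
    simp only [Nat.testBit_succ, e1, e2, e3, Nat.testBit_and]

theorem pvAnd_odd (k : Nat) : (2*k + 1) &&& (2*k) = 2*k := by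
  apply Nat.eq_of_testBit_eq
  intro i
  cases i with
  | zero =>
    rw [Nat.testBit_and]
    have ha : (2*k+1) % 2 = 1 := by omega
    have hb : (2*k) % 2 = 0 := by omega
    simp only [Nat.testBit_zero, ha, hb]
    simp
  | succ i =>
    have e1 : (2*k + 1) / 2 = k := by omega
    have e2 : (2*k) / 2 = k := by omega
    rw [Nat.testBit_and]
    simp only [Nat.testBit_succ, e1, e2, Bool.and_self]

theorem pvXor_two_mul (a b : Nat) : (2*a) ^^^ (2*b) = 2 * (a ^^^ b) := by
  apply Nat.eq_of_testBit_eq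
  intro i
  cases i with
  | zero =>
    rw [Nat.testBit_xor]
    have ha : (2*a) % 2 = 0 := by omega
    have hb : (2*b) % 2 = 0 := by omega
    have hc : (2 * (a ^^^ b)) % 2 = 0 := by omega
    simp only [Nat.testBit_zero, ha, hb, hc]
    simp
  | succ i =>
    have e1 : (2*a) / 2 = a := by omega
    have e2 : (2*b) / 2 = b := by omega
    have e3 : (2 * (a ^^^ b)) / 2 = a ^^^ b := by omega
    rw [Nat.testBit_xor]
    simp only [Nat.testBit_succ, e1, e2, e3, Nat.testBit_xor]

theorem pvXor_odd_one (k : Nat) : (2*k + 1) ^^^ 1 = 2*k := by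
  apply Nat.eq_of_testBit_eq
  intro i
  cases i with
  | zero =>
    rw [Nat.testBit_xor]
    have ha : (2*k+1) % 2 = 1 := by omega
    have hb : (2*k) % 2 = 0 := by omega
    simp only [Nat.testBit_zero, ha, hb]
    simp
  | succ i =>
    have e1 : (2*k + 1) / 2 = k := by omega
    have e2 : (1:Nat) / 2 = 0 := by omega
    have e3 : (2*k) / 2 = k := by omega
    rw [Nat.testBit_xor]
    simp only [Nat.testBit_succ, e1, e2, e3, Nat.zero_testBit, Bool.xor_false]

theorem pvBitLength_two_mul (a : Nat) (h : 0 < a) :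
    PySem.Int.bitLength ((2*a : Nat) : Int) = PySem.Int.bitLength ((a : Nat) : Int) + 1 := by
  rw [PySem.Int.bitLength_natCast (by omega : 0 < 2*a)]
  congr 2
  omega

theorem pvBitIdx_even (fuel : Nat) : ∀ k : Nat,
    pvBitIdx fuel ((2*k : Nat) : Int) = (pvBitIdx fuel ((k : Nat) : Int)).map (· + 1) := by
  induction fuel with
  | zero => intro k; rfl
  | succ fuel ih =>
    intro k
    by_cases hk : k = 0
    · subst hk; simp [pvBitIdx]
    · have hkpos : 0 < k := Nat.pos_of_ne_zero hk
      have h2k : 0 < 2*k := by omega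
      have hlow : 0 < k - (k &&& (k-1)) := by
        have := Nat.and_le_right (n := k) (m := k - 1)
        omega
      rw [pvBitIdx, pvBitIdx]
      rw [if_pos (by exact_mod_cast Nat.pos_iff_ne_zero.mp h2k), if_pos (by exact_mod_cast Nat.pos_iff_ne_zero.mp hkpos)]
      have e2k : PySem.Int.band ((2*k : Nat) : Int) (-((2*k : Nat) : Int)) = ((2 * (k - (k &&& (k-1))) : Nat) : Int) := by
        rw [pvBand_lowest (2*k) h2k, pvAnd_two_mul k hkpos]
        congr 1
        have := Nat.and_le_right (n := k) (m := k - 1)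
        omega
      have ek : PySem.Int.band ((k : Nat) : Int) (-((k : Nat) : Int)) = ((k - (k &&& (k-1)) : Nat) : Int) :=
        pvBand_lowest k hkpos
      rw [e2k, ek]
      rw [List.map_cons]
      congr 1
      · rw [pvBitLength_two_mul _ hlow]
        push_cast
        ring
      · rw [PySem.Int.bxor_natCast, PySem.Int.bxor_natCast, pvXor_two_mul]
        exact ih (k ^^^ (k - (k &&& (k-1))))

theorem pvBitIdx_odd (fuel k : Nat) :
    pvBitIdx (fuel + 1) ((2*k + 1 : Nat) : Int)
      = 0 :: (pvBitIdx fuel ((k : Nat) : Int)).map (· + 1) := by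
  have hpos : 0 < 2*k + 1 := by omega
  rw [pvBitIdx, if_pos (by exact_mod_cast Nat.pos_iff_ne_zero.mp hpos)]
  have elow : PySem.Int.band ((2*k+1 : Nat) : Int) (-((2*k+1 : Nat) : Int)) = ((1 : Nat) : Int) := by
    rw [pvBand_lowest (2*k+1) hpos]
    congr 1
    have h1 : (2*k + 1) - 1 = 2*k := by omega
    rw [h1, pvAnd_odd]
    omega
  rw [elow]
  congr 1
  rw [PySem.Int.bxor_natCast]
  rw [show (2*k+1) ^^^ 1 = 2*k from pvXor_odd_one k]
  exact pvBitIdx_even fuel k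

def pvBits (w m : Nat) : List Nat := (List.range w).filter m.testBit

theorem pvFilter_map {α β : Type} (c : α → β) (p : β → Bool) (q : α → Bool)
    (h : ∀ x, p (c x) = q x) : ∀ l : List α, (l.map c).filter p = (l.filter q).map c := by
  intro l
  induction l with
  | nil => rfl
  | cons x xs ih =>
    simp only [List.map_cons, List.filter_cons, h x]
    cases q x <;> simp [ih]

theorem pvBits_even (w k : Nat) : pvBits (w+1) (2*k) = (pvBits w k).map (· + 1) := by
  unfold pvBits
  rw [List.range_succ_eq_map, List.filter_cons]
  have h0 : (2*k).testBit 0 = false := by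
    simp only [Nat.testBit_zero, decide_eq_false_iff_not]
    omega
  rw [h0]
  simp only [Bool.false_eq_true, if_false]
  rw [pvFilter_map Nat.succ (2*k).testBit k.testBit (fun x => by
    rw [Nat.testBit_succ]; congr 1; omega)]

theorem pvBits_odd (w k : Nat) : pvBits (w+1) (2*k+1) = 0 :: (pvBits w k).map (· + 1) := by
  unfold pvBits
  rw [List.range_succ_eq_map, List.filter_cons]
  have h0 : (2*k+1).testBit 0 = true := by
    simp only [Nat.testBit_zero, decide_eq_true_eq]
    omega
  rw [h0]
  simp only [if_true]
  rw [pvFilter_map Nat.succ (2*k+1).testBit k.testBit (fun x => by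
    rw [Nat.testBit_succ]; congr 1; omega)]

theorem pvBitIdx_zero (fuel : Nat) : pvBitIdx fuel 0 = [] := by
  cases fuel <;> simp [pvBitIdx]

theorem pvMap_cast_add_one (l : List Nat) :
    (l.map (fun j : Nat => (j : Int))).map (· + 1)
      = (l.map (· + 1)).map (fun j : Nat => (j : Int)) := by
  rw [List.map_map, List.map_map]
  apply List.map_congr_left
  intro x _
  simp only [Function.comp_apply]
  push_cast
  ring

theorem pvBitIdx_spec (w : Nat) : ∀ (fuel m : Nat), m < 2^w → w ≤ fuel →
    pvBitIdx fuel (m : Int) = (pvBits w m).map (fun j : Nat => (j : Int)) := by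
  induction w with
  | zero =>
    intro fuel m hm _
    have : m = 0 := by omega
    subst this
    simp [pvBitIdx_zero, pvBits]
  | succ w ih =>
    intro fuel m hm hf
    obtain ⟨f, rfl⟩ : ∃ f, fuel = f + 1 := ⟨fuel - 1, by omega⟩
    rcases Nat.even_or_odd m with he | ho
    · obtain ⟨k, hk2⟩ := he
      have hw : k < 2^w := by
        have : 2^(w+1) = 2 * 2^w := by ring
        omega
      rw [show m = 2*k from by omega, pvBitIdx_even, pvBits_even,
        ih (f+1) k hw (by omega), ← pvMap_cast_add_one]
    · obtain ⟨k, hk2⟩ := ho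
      have hw : k < 2^w := by
        have : 2^(w+1) = 2 * 2^w := by ring
        omega
      rw [show m = 2*k+1 from by omega, pvBitIdx_odd, pvBits_odd,
        ih f k hw (by omega)]
      rw [List.map_cons, ← pvMap_cast_add_one]
      norm_num

theorem pvBitRegs_eq_map (fuel : Nat) : ∀ m : Int,
    pvBitRegs fuel m = (pvBitIdx fuel m).map (fun i => "R" ++ PySem.Int.toStr i) := by
  induction fuel with
  | zero => intro m; rfl
  | succ f ih =>
    intro m
    simp only [pvBitRegs, pvBitIdx]
    split
    · simp [ih]
    · rfl

theorem pvBand_range (instr : Int) :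
    0 ≤ PySem.Int.band instr 65535 ∧ PySem.Int.band instr 65535 < 65536 := by
  unfold PySem.Int.band
  by_cases h : (0:Int) ≤ instr
  · have h2 : (0:Int) ≤ 65535 := by omega
    simp only [if_pos h, if_pos h2]
    have : instr.toNat &&& (65535:Int).toNat < 2^16 :=
      Nat.and_lt_two_pow _ (by norm_num)
    omega
  · have h2 : (0:Int) ≤ 65535 := by omega
    simp only [if_neg h, if_pos h2]
    have : (65535:Int).toNat - ((65535:Int).toNat &&& (-instr - 1).toNat) ≤ 65535 := by
      have := Nat.sub_le (65535:Int).toNat ((65535:Int).toNat &&& (-instr - 1).toNat)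
      omega
    omega

theorem pvRange16 : PySem.List.pyRange 0 16 1 = (List.range 16).map (fun k : Nat => (k : Int)) := by
  decide

theorem pvPredB (n j : Nat) :
    (decide (PySem.Int.band (n : Int) (((1 <<< ((j : Int)).toNat) : Nat) : Int) ≠ 0)) = n.testBit j := by
  have h1 : ((j:Int)).toNat = j := by omega
  rw [h1, PySem.Int.band_natCast, Nat.one_shiftLeft, Nat.and_two_pow]
  cases hb : n.testBit j <;> simp

theorem pvRegsA (n : Nat) :
    (PySem.List.pyRange 0 16 1).foldl
      (fun acc i => if PySem.Int.band (n : Int) (1 <<< i.toNat) ≠ 0 then acc ++ ["R" ++ PySem.Int.toStr i] else acc) []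
      = (pvBits 16 n).map (fun j : Nat => "R" ++ PySem.Int.toStr (j : Int)) := by
  rw [PySem.List.foldl_append_ite, List.nil_append, pvRange16,
    pvFilter_map (fun k : Nat => (k : Int))
      (fun i : Int => decide (PySem.Int.band (n : Int) (((1 <<< i.toNat : Nat)) : Int) ≠ 0))
      n.testBit (fun x => pvPredB n x),
    List.map_map]
  rfl

-- ===== VERDICT (by name: the statement is the Claim_ definition above) =====
theorem disasm_ldm_stm_spec : Claim_equal_disasm_ldm_stm := by
  intro instr cond _
  unfold Spec_disasm_ldm_stm disasm_ldm_stm disasm_ldm_stm_alt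
  obtain ⟨h0, h1⟩ := pvBand_range instr
  obtain ⟨n, hlt, heq⟩ : ∃ n : Nat, n < 65536 ∧ PySem.Int.band instr 65535 = (n : Int) :=
    ⟨(PySem.Int.band instr 65535).toNat, by omega, by omega⟩
  simp only [heq]
  rw [pvRegsA n, pvBitRegs_eq_map, pvBitIdx_spec 16 16 n hlt (le_refl 16), List.map_map]
  rfl
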